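-- pv_equiv track=rewrite | github.com/Lakshikadhonchak053/HIT137CDU | encrypt.py | decrypt_text_with_meta
-- ===== SOURCE A (Python) =====
-- ALPHA_LOWER = "abcdefghijklmnopqrstuvwxyz"
--
-- ALPHA_UPPER = "ABCDEFGHIJKLMNOPQRSTUVWXYZ"
--
-- def _shift_char(c: str, shift: int, alphabet: str) -> str:
--     if c not in alphabet:
--         return c
--     n = len(alphabet)
--     idx = alphabet.index(c)
--     return alphabet[(idx + shift) % n]
--
-- def decrypt_text_with_meta(ciphertext: str, metadata: str, shift1: int, shift2: int) -> str:
--     """Deterministically decrypt using sidecar metadata produced during encryption."""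
--     if len(ciphertext) != len(metadata):
--         raise ValueError("Ciphertext and metadata lengths do not match")
--     result_chars = []
--     for c, m in zip(ciphertext, metadata):
--         if m == 'l':
--             result_chars.append(_shift_char(c, -(shift1 * shift2), ALPHA_LOWER))
--         elif m == 'L':
--             result_chars.append(_shift_char(c, (shift1 + shift2), ALPHA_LOWER))
--         elif m == 'u':
--             result_chars.append(_shift_char(c, shift1, ALPHA_UPPER))
--         elif m == 'U':
--             result_chars.append(_shift_char(c, -(shift2 ** 2), ALPHA_UPPER))
--         else:
--             result_chars.append(c)
--     return "".join(result_chars)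
-- ===== SOURCE B (Python) =====
-- ALPHA_LOWER = "abcdefghijklmnopqrstuvwxyz"
--
-- ALPHA_UPPER = "ABCDEFGHIJKLMNOPQRSTUVWXYZ"
--
-- def _table(alphabet, shift):
--     k = shift % 26
--     return str.maketrans(alphabet, alphabet[k:] + alphabet[:k])
--
-- def decrypt_text_with_meta(ciphertext, metadata, shift1, shift2):
--     if len(ciphertext) != len(metadata):
--         raise ValueError("Ciphertext and metadata lengths do not match")
--     variants = {
--         'l': ciphertext.translate(_table(ALPHA_LOWER, -(shift1 * shift2))),
--         'L': ciphertext.translate(_table(ALPHA_LOWER, shift1 + shift2)),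
--         'u': ciphertext.translate(_table(ALPHA_UPPER, shift1)),
--         'U': ciphertext.translate(_table(ALPHA_UPPER, -(shift2 ** 2))),
--     }
--     return ''.join(variants.get(m, ciphertext)[i] for i, m in enumerate(metadata))
-- ===== Notes on version B (the rewrite author's own statement) =====
-- stated objective: alternative
-- what changed: B replaces A's per-character if/elif ladder with linear alphabet scans by four whole-string translation passes through precomputed str.maketrans rotation tables, followed by a single per-position selection of the right translated copy by metadata.
import Mathlib
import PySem

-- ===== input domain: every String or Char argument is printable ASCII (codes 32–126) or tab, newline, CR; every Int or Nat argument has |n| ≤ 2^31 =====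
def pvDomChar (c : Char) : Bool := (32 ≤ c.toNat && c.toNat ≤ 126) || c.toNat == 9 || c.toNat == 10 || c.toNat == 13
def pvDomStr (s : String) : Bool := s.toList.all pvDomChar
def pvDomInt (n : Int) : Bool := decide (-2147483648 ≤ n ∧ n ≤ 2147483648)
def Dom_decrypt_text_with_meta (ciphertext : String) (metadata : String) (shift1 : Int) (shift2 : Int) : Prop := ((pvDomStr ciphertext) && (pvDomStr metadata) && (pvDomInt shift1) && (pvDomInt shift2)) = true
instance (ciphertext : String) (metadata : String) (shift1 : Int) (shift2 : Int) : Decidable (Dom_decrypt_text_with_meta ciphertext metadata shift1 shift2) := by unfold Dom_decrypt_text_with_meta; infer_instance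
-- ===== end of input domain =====

-- B is a staged-pass re-implementation: it translates the WHOLE ciphertext four times via
-- precomputed rotation tables (str.maketrans) and then selects per position by metadata;
-- the same length-mismatch ValueError is kept.
-- ===== PORT A =====
def ALPHA_LOWER : String := "abcdefghijklmnopqrstuvwxyz"

def ALPHA_UPPER : String := "ABCDEFGHIJKLMNOPQRSTUVWXYZ"

def pv_shift_char (c : Char) (shift : Int) (alphabet : String) : Char :=
  if ¬ (alphabet.toList.contains c = true) then c
  else
    PySem.List.pyGetD alphabet.toList
      (PySem.Int.mod ((((PySem.List.index? alphabet.toList c).getD 0 : Nat) : Int) + shift)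
        (alphabet.toList.length : Int)) c

def decrypt_text_with_meta (ciphertext : String) (metadata : String) (shift1 : Int) (shift2 : Int) : String :=
  -- length-mismatch ValueError is excluded by Pre_
  String.mk ((List.zip ciphertext.toList metadata.toList).foldl
    (fun result_chars p =>
      if p.2 = 'l' then result_chars ++ [pv_shift_char p.1 (-(shift1 * shift2)) ALPHA_LOWER]
      else if p.2 = 'L' then result_chars ++ [pv_shift_char p.1 (shift1 + shift2) ALPHA_LOWER]
      else if p.2 = 'u' then result_chars ++ [pv_shift_char p.1 shift1 ALPHA_UPPER]
      else if p.2 = 'U' then result_chars ++ [pv_shift_char p.1 (-(shift2 ^ 2)) ALPHA_UPPER]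
      else result_chars ++ [p.1]) [])

-- ===== PORT B =====
-- str.maketrans(alphabet, alphabet[k:] + alphabet[:k]) as a Char → Char dict
def pv_table (alphabet : String) (shift : Int) : PySem.Dict Char Char :=
  let k := (PySem.Int.mod shift 26).toNat
  PySem.Dict.ofList (List.zip alphabet.toList (alphabet.toList.drop k ++ alphabet.toList.take k))

-- s.translate(tbl): chars absent from the table pass through unchanged
def pv_translate (s : List Char) (tbl : PySem.Dict Char Char) : List Char :=
  s.map (fun c => (PySem.Dict.get? tbl c).getD c)

def decrypt_text_with_meta_alt (ciphertext : String) (metadata : String) (shift1 : Int) (shift2 : Int) : String :=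
  -- same length-mismatch ValueError guard as A; excluded by Pre_
  let cl := ciphertext.toList
  let variants : PySem.Dict Char (List Char) := PySem.Dict.ofList
    [('l', pv_translate cl (pv_table ALPHA_LOWER (-(shift1 * shift2)))),
     ('L', pv_translate cl (pv_table ALPHA_LOWER (shift1 + shift2))),
     ('u', pv_translate cl (pv_table ALPHA_UPPER shift1)),
     ('U', pv_translate cl (pv_table ALPHA_UPPER (-(shift2 ^ 2))))]
  -- the index p.1 is always in range under Pre_ (equal lengths), so pyGetD's default is unreachable
  String.mk ((PySem.List.enumerate metadata.toList 0).map
    (fun p => PySem.List.pyGetD (PySem.Dict.getD variants p.2 cl) p.1 ' '))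

-- ===== PRECONDITION & SPEC =====
-- Pre_ excludes exactly the inputs where A raises ValueError: mismatched lengths.
def Pre_decrypt_text_with_meta (ciphertext : String) (metadata : String) (shift1 : Int) (shift2 : Int) : Prop :=
  ciphertext.toList.length = metadata.toList.length
instance (ciphertext : String) (metadata : String) (shift1 : Int) (shift2 : Int) : Decidable (Pre_decrypt_text_with_meta ciphertext metadata shift1 shift2) := by unfold Pre_decrypt_text_with_meta; infer_instance

def pvWitness_decrypt_text_with_meta : String × String × Int × Int := ("Khoor, Zruog!", "uuuuu..LLllU.", 3, 2)

def Spec_decrypt_text_with_meta (ciphertext : String) (metadata : String) (shift1 : Int) (shift2 : Int) (out : String) : Prop := out = decrypt_text_with_meta_alt ciphertext metadata shift1 shift2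
instance (ciphertext : String) (metadata : String) (shift1 : Int) (shift2 : Int) (out : String) : Decidable (Spec_decrypt_text_with_meta ciphertext metadata shift1 shift2 out) := by unfold Spec_decrypt_text_with_meta; infer_instance

-- ===== CLAIM (what is proved, stated in full; the proofs are below) =====
def Claim_equal_decrypt_text_with_meta : Prop := ∀ (ciphertext : String) (metadata : String) (shift1 : Int) (shift2 : Int), Dom_decrypt_text_with_meta ciphertext metadata shift1 shift2 → Pre_decrypt_text_with_meta ciphertext metadata shift1 shift2 → Spec_decrypt_text_with_meta ciphertext metadata shift1 shift2 (decrypt_text_with_meta ciphertext metadata shift1 shift2)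

-- ===== LEMMAS AND PROOFS =====
theorem pv_getElem_idx_congr {α : Type} (xs : List α) {i j : Nat} (h : i = j)
    (hi : i < xs.length) : xs[i] = xs[j]'(h ▸ hi) := by subst h; rfl

-- the items of a maketrans table are exactly the (source, rotated) pairs
theorem pv_k_lt (s : Int) : (PySem.Int.mod s 26).toNat < 26 := by
  rw [PySem.Int.mod_eq_emod_of_pos (by omega)]
  have h1 := Int.emod_nonneg s (show (26:Int) ≠ 0 by omega)
  have h2 := Int.emod_lt_of_pos s (show (0:Int) < 26 by omega)
  omega

theorem pv_rot_length (a : String) (s : Int) (h26 : a.toList.length = 26) :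
    (a.toList.drop ((PySem.Int.mod s 26).toNat) ++
      a.toList.take ((PySem.Int.mod s 26).toNat)).length = 26 := by
  have := pv_k_lt s
  simp [h26]
  omega

theorem pv_table_items (a : String) (s : Int) (h26 : a.toList.length = 26) (hnd : a.toList.Nodup) :
    (pv_table a s).items =
      List.zip a.toList (a.toList.drop ((PySem.Int.mod s 26).toNat) ++
        a.toList.take ((PySem.Int.mod s 26).toNat)) := by
  have hfst : (List.zip a.toList (a.toList.drop ((PySem.Int.mod s 26).toNat) ++
      a.toList.take ((PySem.Int.mod s 26).toNat))).map Prod.fst = a.toList :=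
    List.map_fst_zip (by rw [pv_rot_length a s h26, h26])
  unfold pv_table PySem.Dict.ofList PySem.Dict.update
  have h := PySem.Dict.items_foldl_insert_fresh
      (List.zip a.toList (a.toList.drop ((PySem.Int.mod s 26).toNat) ++
        a.toList.take ((PySem.Int.mod s 26).toNat)))
      Prod.fst Prod.snd PySem.Dict.empty
      (fun p _ => PySem.Dict.contains_empty p.1)
      (by rw [hfst]; exact hnd)
  exact h.trans (by simp [PySem.Dict.empty])

-- per-character correctness of the table lookup against A's _shift_char
theorem pv_keys (a : String) (s : Int) (h26 : a.toList.length = 26) (hnd : a.toList.Nodup) :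
    (pv_table a s).keys = a.toList := by
  simp only [PySem.Dict.keys, pv_table_items a s h26 hnd]
  exact List.map_fst_zip (by rw [pv_rot_length a s h26, h26])

theorem pv_char_eq (a : String) (h26 : a.toList.length = 26) (hnd : a.toList.Nodup)
    (c : Char) (s : Int) :
    (PySem.Dict.get? (pv_table a s) c).getD c = pv_shift_char c s a := by
  have hk := pv_k_lt s
  have hrl := pv_rot_length a s h26
  have hkc : ((PySem.Int.mod s 26).toNat : Int) = s % 26 := by
    rw [PySem.Int.mod_eq_emod_of_pos (by omega)]
    exact Int.toNat_of_nonneg (Int.emod_nonneg s (by omega))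
  by_cases hc : c ∈ a.toList
  · -- c is in the alphabet: both sides give the rotated letter
    obtain ⟨i, hsome⟩ : ∃ i, List.idxOf? c a.toList = some i :=
      Option.isSome_iff_exists.mp (by
        rw [← PySem.List.index?_eq_idxOf?]
        exact (PySem.List.index?_isSome_iff a.toList c).mpr hc)
    obtain ⟨hi, hci, -⟩ := List.idxOf?_eq_some_iff.mp hsome
    have hi26 : i < 26 := h26 ▸ hi
    have hizip : i < (List.zip a.toList (a.toList.drop ((PySem.Int.mod s 26).toNat) ++
        a.toList.take ((PySem.Int.mod s 26).toNat))).length := by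
      rw [List.length_zip, hrl, h26]; omega
    have hirot : i < (a.toList.drop ((PySem.Int.mod s 26).toNat) ++
        a.toList.take ((PySem.Int.mod s 26).toNat)).length := by rw [hrl]; omega
    have hget : PySem.Dict.get? (pv_table a s) c =
        some ((a.toList.drop ((PySem.Int.mod s 26).toNat) ++
          a.toList.take ((PySem.Int.mod s 26).toNat))[i]'hirot) := by
      apply PySem.Dict.get?_of_mem_items
      · rw [pv_table_items a s h26 hnd]
        have : (List.zip a.toList (a.toList.drop ((PySem.Int.mod s 26).toNat) ++
            a.toList.take ((PySem.Int.mod s 26).toNat)))[i]'hizip =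
            (a.toList[i]'hi, (a.toList.drop ((PySem.Int.mod s 26).toNat) ++
              a.toList.take ((PySem.Int.mod s 26).toNat))[i]'hirot) := List.getElem_zip
        rw [hci] at this
        exact this ▸ List.getElem_mem hizip
      · rw [pv_keys a s h26 hnd]; exact hnd
    rw [hget, Option.getD_some]
    unfold pv_shift_char
    rw [if_neg (by simp [hc])]
    rw [show PySem.List.index? a.toList c = some i from
        (PySem.List.index?_eq_idxOf? a.toList c).trans hsome]
    have hmodi : 0 ≤ PySem.Int.mod ((i : Int) + s) (a.toList.length : Int) ∧
        PySem.Int.mod ((i : Int) + s) (a.toList.length : Int) < (a.toList.length : Int) := by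
      rw [h26, PySem.Int.mod_eq_emod_of_pos (by omega)]
      exact ⟨Int.emod_nonneg _ (by omega), Int.emod_lt_of_pos _ (by omega)⟩
    rw [Option.getD_some, PySem.List.pyGetD_eq_getElem a.toList c hmodi.1 hmodi.2]
    -- both are a[(i + k) % 26]
    have hidx : (PySem.Int.mod ((i : Int) + s) (a.toList.length : Int)).toNat =
        (i + (PySem.Int.mod s 26).toNat) % 26 := by
      rw [h26, PySem.Int.mod_eq_emod_of_pos (by omega)]
      omega
    simp only [hidx]
    by_cases hik : i < 26 - (PySem.Int.mod s 26).toNat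
    · rw [List.getElem_append_left (by rw [List.length_drop, h26]; omega)]
      rw [List.getElem_drop]
      symm
      exact pv_getElem_idx_congr a.toList (by omega) _
    · rw [List.getElem_append_right (by rw [List.length_drop, h26]; omega)]
      rw [List.getElem_take]
      symm
      exact pv_getElem_idx_congr a.toList (by rw [List.length_drop, h26]; omega) _
  · -- c is not in the alphabet: both sides return c unchanged
    rw [(PySem.Dict.get?_eq_none_iff_not_mem_keys _ _).mpr
      (by rw [pv_keys a s h26 hnd]; exact hc), Option.getD_none]
    unfold pv_shift_char
    rw [if_pos (by simp [hc])]

-- ===== VERDICT (by name: the statement is the Claim_ definition above) =====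
theorem pv_low_facts : ALPHA_LOWER.toList.length = 26 ∧ ALPHA_LOWER.toList.Nodup := by decide

theorem pv_up_facts : ALPHA_UPPER.toList.length = 26 ∧ ALPHA_UPPER.toList.Nodup := by decide

theorem pv_variant_elem (cl : List Char) (tbl : PySem.Dict Char Char) (j : Nat)
    (hj : j < cl.length) :
    PySem.List.pyGetD (pv_translate cl tbl) (j : Int) ' ' =
      (PySem.Dict.get? tbl (cl[j]'hj)).getD (cl[j]'hj) := by
  have hlen : (pv_translate cl tbl).length = cl.length := List.length_map ..
  rw [PySem.List.pyGetD_eq_getElem _ _ (by omega) (by rw [hlen]; exact_mod_cast hj)]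
  simp only [Int.toNat_natCast, pv_translate, List.getElem_map]

theorem pv_getD_variants (v1 v2 v3 v4 : List Char) (cl : List Char) (m : Char) :
    PySem.Dict.getD (PySem.Dict.ofList [('l', v1), ('L', v2), ('u', v3), ('U', v4)]) m cl =
      if m = 'l' then v1 else if m = 'L' then v2 else if m = 'u' then v3
      else if m = 'U' then v4 else cl := by
  have h : PySem.Dict.ofList [('l', v1), ('L', v2), ('u', v3), ('U', v4)] =
      ((((PySem.Dict.empty.insert 'l' v1).insert 'L' v2).insert 'u' v3).insert 'U' v4) := rfl
  rw [h, PySem.Dict.getD_insert, PySem.Dict.getD_insert, PySem.Dict.getD_insert,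
    PySem.Dict.getD_insert, PySem.Dict.getD_empty]
  split_ifs <;> simp_all

theorem decrypt_text_with_meta_spec : Claim_equal_decrypt_text_with_meta := by
  intro ciphertext metadata shift1 shift2 hdom hpre
  unfold Spec_decrypt_text_with_meta decrypt_text_with_meta decrypt_text_with_meta_alt
  unfold Pre_decrypt_text_with_meta at hpre
  congr 1
  have hstep : (fun (result_chars : List Char) (p : Char × Char) =>
      if p.2 = 'l' then result_chars ++ [pv_shift_char p.1 (-(shift1 * shift2)) ALPHA_LOWER]
      else if p.2 = 'L' then result_chars ++ [pv_shift_char p.1 (shift1 + shift2) ALPHA_LOWER]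
      else if p.2 = 'u' then result_chars ++ [pv_shift_char p.1 shift1 ALPHA_UPPER]
      else if p.2 = 'U' then result_chars ++ [pv_shift_char p.1 (-(shift2 ^ 2)) ALPHA_UPPER]
      else result_chars ++ [p.1]) =
      (fun result_chars p => result_chars ++
        [if p.2 = 'l' then pv_shift_char p.1 (-(shift1 * shift2)) ALPHA_LOWER
         else if p.2 = 'L' then pv_shift_char p.1 (shift1 + shift2) ALPHA_LOWER
         else if p.2 = 'u' then pv_shift_char p.1 shift1 ALPHA_UPPER
         else if p.2 = 'U' then pv_shift_char p.1 (-(shift2 ^ 2)) ALPHA_UPPER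
         else p.1]) := by
    funext acc p
    split_ifs <;> rfl
  rw [hstep, PySem.List.foldl_append_singleton_eq_map, List.nil_append]
  apply List.ext_getElem
  · rw [List.length_map, List.length_map, List.length_zip,
      PySem.List.length_enumerate, hpre]
    omega
  · intro j h1 h2
    rw [List.length_map, List.length_zip] at h1
    have hjc : j < ciphertext.toList.length := by omega
    have hjm : j < metadata.toList.length := by omega
    simp only [List.getElem_map]
    rw [List.getElem_zip, PySem.List.getElem_enumerate]
    simp only [zero_add]
    rw [pv_getD_variants]
    split_ifs with e1 e2 e3 e4
    · rw [pv_variant_elem _ _ j hjc]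
      exact (pv_char_eq ALPHA_LOWER pv_low_facts.1 pv_low_facts.2 _ _).symm
    · rw [pv_variant_elem _ _ j hjc]
      exact (pv_char_eq ALPHA_LOWER pv_low_facts.1 pv_low_facts.2 _ _).symm
    · rw [pv_variant_elem _ _ j hjc]
      exact (pv_char_eq ALPHA_UPPER pv_up_facts.1 pv_up_facts.2 _ _).symm
    · rw [pv_variant_elem _ _ j hjc]
      exact (pv_char_eq ALPHA_UPPER pv_up_facts.1 pv_up_facts.2 _ _).symm
    · rw [PySem.List.pyGetD_eq_getElem _ _ (by omega) (by exact_mod_cast hjc)]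
      simp
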